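-- pv_equiv track=rewrite | github.com/oyekanmiayo/netscialgos | linearthreshold.py | find_cascade
-- ===== SOURCE A (Python) =====
-- def find_cascade(graph, active, threshold):
--     new_active = [n for n in active]
--
--     for node, neighbors in graph.items():
--         if node in active:
--             continue
--
--         cumulative_input = 0
--         for neighbor, weight in neighbors:
--             state = 0
--             if neighbor in active:
--                 state = 1
--             val = state * weight
--             cumulative_input += val
--
--         if cumulative_input >= threshold:
--             new_active.append(node)
--
--     if len(new_active) > len(active):
--         return find_cascade(graph, new_active, threshold)
--
--     return new_active
-- ===== SOURCE B (Python) =====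
-- def find_cascade(graph, active, threshold):
--     # reverse index: neighbor -> [(node, weight)], so every activation
--     # propagates its weight instead of re-summing all edges each round
--     rev = {}
--     for node, neighbors in graph.items():
--         for nb, w in neighbors:
--             rev.setdefault(nb, []).append((node, w))
--
--     score = {}          # current cumulative input of each node
--     active_set = set()
--     result = list(active)
--
--     def activate(x):
--         active_set.add(x)
--         for tgt, w in rev.get(x, []):
--             score[tgt] = score.get(tgt, 0) + w
--
--     for a in active:
--         if a not in active_set:
--             activate(a)
--
--     while True:
--         newly = [node for node in graph
--                  if node not in active_set and score.get(node, 0) >= threshold]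
--         if not newly:
--             return result
--         for x in newly:
--             activate(x)
--         result += newly
-- ===== Notes on version B (the rewrite author's own statement) =====
-- stated objective: faster
-- what changed: Replaces A's per-round full edge re-summation and recursive fixpoint with an incremental algorithm: a reverse index (neighbor -> [(node, weight)]) is built once and a score dict is updated only when a node activates, so each round merely scans keys and compares cached scores against the threshold.
import Mathlib
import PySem

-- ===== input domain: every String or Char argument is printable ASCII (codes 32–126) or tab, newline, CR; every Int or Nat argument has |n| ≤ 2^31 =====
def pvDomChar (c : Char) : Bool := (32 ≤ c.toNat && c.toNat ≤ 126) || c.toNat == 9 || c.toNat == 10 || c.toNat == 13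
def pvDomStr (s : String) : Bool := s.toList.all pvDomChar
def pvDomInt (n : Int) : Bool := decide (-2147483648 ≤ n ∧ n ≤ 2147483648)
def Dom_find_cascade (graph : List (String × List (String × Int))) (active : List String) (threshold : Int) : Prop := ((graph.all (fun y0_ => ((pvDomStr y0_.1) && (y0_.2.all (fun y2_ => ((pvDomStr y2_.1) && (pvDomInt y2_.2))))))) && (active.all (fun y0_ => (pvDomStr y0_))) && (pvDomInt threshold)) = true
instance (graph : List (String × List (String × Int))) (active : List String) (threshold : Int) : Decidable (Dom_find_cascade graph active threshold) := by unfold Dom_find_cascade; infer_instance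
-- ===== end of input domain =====

-- B replaces A's per-round edge re-summation and recursive fixpoint by an incremental
-- algorithm: a reverse index built once and a score dict updated only on activation.


-- ===== PORT A =====
-- one round of A: copy `active`, scan graph.items(), append qualifying nodes
def cascadeStepA (items : List (String × List (String × Int))) (threshold : Int)
    (active : List String) : List String :=
  items.foldl (fun new_active p =>
    if active.contains p.1 then new_active
    else
      let cumulative_input :=
        p.2.foldl (fun acc q => acc + (if active.contains q.1 then 1 else 0) * q.2) 0
      if threshold ≤ cumulative_input then new_active ++ [p.1] else new_active) active

-- A's recursion; fuel = items.length + 1 rounds always suffices because each recursive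
-- call strictly enlarges `active` with distinct graph keys (fuel 0 is never reached)
def cascadeRecA (items : List (String × List (String × Int))) (threshold : Int) :
    Nat → List String → List String
  | 0, active => active
  | fuel + 1, active =>
    let new_active := cascadeStepA items threshold active
    if active.length < new_active.length then cascadeRecA items threshold fuel new_active
    else new_active

def find_cascade (graph : List (String × List (String × Int))) (active : List String) (threshold : Int) : List String :=
  let items := (PySem.Dict.ofList graph).items
  cascadeRecA items threshold (items.length + 1) active

-- ===== PORT B =====
-- reverse index: neighbor -> [(node, weight)]  (rev.setdefault(nb, []).append((node, w)))
def buildRev (items : List (String × List (String × Int))) : PySem.Dict String (List (String × Int)) :=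
  items.foldl (fun d p =>
    p.2.foldl (fun d q => d.modify q.1 [] (· ++ [(p.1, q.2)])) d) PySem.Dict.empty

-- activate(x): add x to the active set and propagate its weights into the score dict
def cascadeActivate (rev : PySem.Dict String (List (String × Int)))
    (st : PySem.Set String × PySem.Dict String Int) (x : String) :
    PySem.Set String × PySem.Dict String Int :=
  (PySem.Set.add st.1 x,
   (rev.getD x []).foldl (fun sc e => sc.insert e.1 (sc.getD e.1 0 + e.2)) st.2)

-- B's while-loop: each round scans the keys against the cached scores, then
-- activates the newly reached nodes (fuel bounds the rounds; never reached)
def cascadeLoopB (keys : List String) (rev : PySem.Dict String (List (String × Int)))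
    (threshold : Int) :
    Nat → List String → PySem.Set String × PySem.Dict String Int → List String
  | 0, result, _ => result
  | fuel + 1, result, st =>
    let newly := keys.filter
      (fun k => !PySem.Set.contains st.1 k && decide (threshold ≤ st.2.getD k 0))
    if newly.isEmpty then result
    else cascadeLoopB keys rev threshold fuel (result ++ newly)
      (newly.foldl (cascadeActivate rev) st)

def find_cascade_alt (graph : List (String × List (String × Int))) (active : List String) (threshold : Int) : List String :=
  let items := (PySem.Dict.ofList graph).items
  let rev := buildRev items
  let st := active.foldl
    (fun st a => if PySem.Set.contains st.1 a then st else cascadeActivate rev st a)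
    (PySem.Set.empty, PySem.Dict.empty)
  cascadeLoopB (items.map (·.1)) rev threshold (items.length + 1) active st

-- ===== PRECONDITION & SPEC =====
def Spec_find_cascade (graph : List (String × List (String × Int))) (active : List String) (threshold : Int) (out : List String) : Prop := out = find_cascade_alt graph active threshold
instance (graph : List (String × List (String × Int))) (active : List String) (threshold : Int) (out : List String) : Decidable (Spec_find_cascade graph active threshold out) := by unfold Spec_find_cascade; infer_instance

-- ===== CLAIM (what is proved, stated in full; the proofs are below) =====
def Claim_equal_find_cascade : Prop := ∀ (graph : List (String × List (String × Int))) (active : List String) (threshold : Int), Dom_find_cascade graph active threshold → Spec_find_cascade graph active threshold (find_cascade graph active threshold)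

-- ===== LEMMAS AND PROOFS =====

-- weight sum of the neighbors currently active (membership given by the list `act`)
def wsum (nbrs : List (String × Int)) (act : List String) : Int :=
  ((nbrs.filter (fun q => act.contains q.1)).map (·.2)).sum

-- score invariant: the score dict caches wsum of every graph item
def ScoreInv (items : List (String × List (String × Int)))
    (sc : PySem.Dict String Int) (act : List String) : Prop :=
  ∀ p ∈ items, sc.getD p.1 0 = wsum p.2 act

-- the flattened edge list (source neighbor, (target node, weight))
def edgesOf (items : List (String × List (String × Int))) : List (String × (String × Int)) :=
  items.flatMap (fun p => p.2.map (fun q => (q.1, (p.1, q.2))))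

theorem wsum_congr (nbrs : List (String × Int)) (act act' : List String)
    (h : ∀ y, act.contains y = act'.contains y) : wsum nbrs act = wsum nbrs act' := by
  unfold wsum
  rw [List.filter_congr (fun q _ => h q.1)]

theorem wsum_append_single (nbrs : List (String × Int)) (act : List String) (x : String)
    (hx : act.contains x = false) :
    wsum nbrs (act ++ [x]) = wsum nbrs act + ((nbrs.filter (fun q => q.1 == x)).map (·.2)).sum := by
  induction nbrs with
  | nil => simp [wsum]
  | cons q rest ih =>
    have hax : ((act ++ [x]).contains q.1) = (act.contains q.1 || (q.1 == x)) := by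
      by_cases h : q.1 = x <;> simp [h]
    simp only [wsum, List.filter_cons, hax] at ih ⊢
    by_cases hq : (q.1 == x) = true
    · have hq' : q.1 = x := by simpa using hq
      have ha : act.contains q.1 = false := by rw [hq']; exact hx
      simp only [ha, hq, Bool.false_or, Bool.false_eq_true, if_false, if_true,
        List.map_cons, List.sum_cons]
      omega
    · have hq0 : (q.1 == x) = false := by simpa using hq
      simp only [hq0, Bool.or_false, Bool.false_eq_true, if_false]
      by_cases ha : act.contains q.1 = true
      · simp only [ha, if_true, List.map_cons, List.sum_cons]
        omega
      · have ha0 : act.contains q.1 = false := by simpa using ha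
        simp only [ha0, Bool.false_eq_true, if_false]
        omega

-- A's 0/1-state accumulation computes wsum
theorem foldl01_eq_wsum (nbrs : List (String × Int)) (act : List String) (init : Int) :
    nbrs.foldl (fun acc q => acc + (if act.contains q.1 then 1 else 0) * q.2) init
      = init + wsum nbrs act := by
  induction nbrs generalizing init with
  | nil => simp [wsum]
  | cons q rest ih =>
    rw [List.foldl_cons, ih]
    simp only [wsum, List.filter_cons]
    by_cases hq : act.contains q.1 = true
    · simp only [hq, if_true, one_mul, List.map_cons, List.sum_cons]
      ring
    · simp only [Bool.not_eq_true] at hq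
      simp only [hq, Bool.false_eq_true, if_false, zero_mul, add_zero]

-- buildRev is the modify-fold over the flattened edge list
theorem buildRev_eq (items : List (String × List (String × Int))) :
    buildRev items
      = (edgesOf items).foldl (fun d p => d.modify p.1 [] (· ++ [p.2])) PySem.Dict.empty := by
  unfold buildRev edgesOf
  rw [List.foldl_flatMap]
  have hfun : (fun (acc : PySem.Dict String (List (String × Int)))
        (x : String × List (String × Int)) =>
        (x.2.map (fun q => (q.1, (x.1, q.2)))).foldl
          (fun d p => d.modify p.1 [] (· ++ [p.2])) acc)
      = fun acc x => x.2.foldl (fun d q => d.modify q.1 [] (· ++ [(x.1, q.2)])) acc := by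
    funext acc x
    rw [List.foldl_map]
  rw [hfun]

-- folding insert-add over a list of (target, weight) adds the per-target weight sum
theorem foldl_insert_add (L : List (String × Int)) (sc : PySem.Dict String Int) (t : String) :
    (L.foldl (fun sc e => sc.insert e.1 (sc.getD e.1 0 + e.2)) sc).getD t 0
      = sc.getD t 0 + ((L.filter (fun e => e.1 == t)).map (·.2)).sum := by
  induction L generalizing sc with
  | nil => simp
  | cons e rest ih =>
    rw [List.foldl_cons, ih, PySem.Dict.getD_insert, List.filter_cons]
    by_cases he : e.1 = t
    · simp only [he, BEq.rfl, if_true, List.map_cons, List.sum_cons]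
      omega
    · have h2 : (e.1 == t) = false := by simp [he]
      simp only [h2, Bool.false_eq_true, if_false, if_neg (Ne.symm he)]

-- a key absent from `items` contributes nothing to the reverse edge list
theorem revx_sum_zero (items : List (String × List (String × Int))) (x t : String)
    (ht : t ∉ items.map (·.1)) :
    (((((edgesOf items).filter (fun e => e.1 == x)).map (·.2)).filter
        (fun e => e.1 == t)).map (·.2)).sum = 0 := by
  induction items with
  | nil => simp [edgesOf]
  | cons p rest ih =>
    simp only [List.map_cons, List.mem_cons, not_or] at ht
    have hpt : (p.1 == t) = false := by simp [Ne.symm ht.1]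
    simp only [edgesOf, List.flatMap_cons, List.filter_append, List.map_append,
      List.sum_append, List.filter_map, List.map_map]
    rw [show ((fun (e : String × Int) => e.1 == t) ∘
        ((·.2) ∘ fun q : String × Int => (q.1, (p.1, q.2)))) = fun _ => (p.1 == t) from rfl]
    simp only [hpt, List.filter_false, List.map_nil, List.sum_nil, zero_add]
    simpa only [edgesOf, List.filter_map, List.map_map] using ih ht.2

-- the rev entries of source x targeting t sum to the x-weights of item t
theorem revx_sum (items : List (String × List (String × Int))) (x t : String)
    (nbrs : List (String × Int)) (hn : (items.map (·.1)).Nodup) (hmem : (t, nbrs) ∈ items) :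
    (((((edgesOf items).filter (fun e => e.1 == x)).map (·.2)).filter
        (fun e => e.1 == t)).map (·.2)).sum
      = ((nbrs.filter (fun q => q.1 == x)).map (·.2)).sum := by
  induction items with
  | nil => simp at hmem
  | cons p rest ih =>
    simp only [List.map_cons, List.nodup_cons] at hn
    simp only [edgesOf, List.flatMap_cons, List.filter_append, List.map_append,
      List.sum_append, List.filter_map, List.map_map]
    rcases List.mem_cons.mp hmem with hp | hrest
    · subst hp
      simp only
      rw [show ((fun (e : String × Int) => e.1 == t) ∘
          ((·.2) ∘ fun q : String × Int => (q.1, (t, q.2)))) = fun _ => (t == t) from rfl]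
      simp only [BEq.rfl, List.filter_true]
      rw [show ((fun (e : String × (String × Int)) => e.1 == x) ∘
          fun q : String × Int => (q.1, (t, q.2))) = fun q : String × Int => q.1 == x from rfl]
      have hz := revx_sum_zero rest x t hn.1
      simp only [edgesOf, List.filter_map, List.map_map] at hz
      rw [hz, add_zero]
      rfl
    · have hpt : (p.1 == t) = false := by
        have : p.1 ≠ t := fun he => hn.1 (he ▸ (List.mem_map.mpr ⟨(t, nbrs), hrest, rfl⟩))
        simp [this]
      rw [show ((fun (e : String × Int) => e.1 == t) ∘
          ((·.2) ∘ fun q : String × Int => (q.1, (p.1, q.2)))) = fun _ => (p.1 == t) from rfl]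
      simp only [hpt, List.filter_false, List.map_nil, List.sum_nil, zero_add]
      have := ih hn.2 hrest
      simpa only [edgesOf, List.filter_map, List.map_map] using this

-- activating x updates every cached score from wsum act to wsum (act ++ [x])
theorem activate_score (items : List (String × List (String × Int))) (x : String)
    (hn : (items.map (·.1)).Nodup) (sc : PySem.Dict String Int) (act : List String)
    (hx : act.contains x = false) (inv : ScoreInv items sc act) :
    ScoreInv items
      (((buildRev items).getD x []).foldl
        (fun sc e => sc.insert e.1 (sc.getD e.1 0 + e.2)) sc) (act ++ [x]) := by
  intro p hp
  have hrev : (buildRev items).getD x []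
      = ((edgesOf items).filter (fun e => e.1 == x)).map (·.2) := by
    rw [buildRev_eq]
    simpa using PySem.Dict.getD_foldl_modify_append (edgesOf items) PySem.Dict.empty x
  rw [foldl_insert_add, hrev, inv p hp, wsum_append_single p.2 act x hx]
  congr 1
  exact revx_sum items x p.1 p.2 hn (by simpa using hp)

-- one activation step preserves the set/score invariants
theorem activate_one (items : List (String × List (String × Int))) (x : String)
    (hn : (items.map (·.1)).Nodup) (s : PySem.Set String) (sc : PySem.Dict String Int)
    (act : List String) (hx : act.contains x = false)
    (h : ∀ y, PySem.Set.contains s y = act.contains y) (inv : ScoreInv items sc act) :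
    (∀ y, PySem.Set.contains (cascadeActivate (buildRev items) (s, sc) x).1 y
        = (act ++ [x]).contains y)
      ∧ ScoreInv items (cascadeActivate (buildRev items) (s, sc) x).2 (act ++ [x]) := by
  constructor
  · intro y
    have hy := h y
    simp only [cascadeActivate, PySem.Set.contains_eq_listContains, List.contains_eq_mem,
      decide_eq_decide] at hy ⊢
    simp only [PySem.Set.mem_add, List.mem_append, List.mem_singleton]
    tauto
  · exact activate_score items x hn sc act hx inv

-- activating a nodup list of fresh nodes preserves the invariants
theorem activate_fold (items : List (String × List (String × Int))) (L : List String)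
    (hn : (items.map (·.1)).Nodup) :
    ∀ (act : List String) (s : PySem.Set String) (sc : PySem.Dict String Int),
    L.Nodup → (∀ x ∈ L, act.contains x = false) →
    (∀ y, PySem.Set.contains s y = act.contains y) → ScoreInv items sc act →
    (∀ y, PySem.Set.contains (L.foldl (cascadeActivate (buildRev items)) (s, sc)).1 y
        = (act ++ L).contains y)
      ∧ ScoreInv items (L.foldl (cascadeActivate (buildRev items)) (s, sc)).2 (act ++ L) := by
  induction L with
  | nil =>
    intro act s sc _ _ h inv
    simp only [List.foldl_nil, List.append_nil]
    exact ⟨h, inv⟩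
  | cons a L ih =>
    intro act s sc hLnd hfresh h inv
    obtain ⟨hnd1, hnd2⟩ := List.nodup_cons.mp hLnd
    obtain ⟨h1, inv1⟩ := activate_one items a hn s sc act (hfresh a (by simp)) h inv
    have hfresh' : ∀ z ∈ L, (act ++ [a]).contains z = false := by
      intro z hz
      have hz1 : act.contains z = false := hfresh z (by simp [hz])
      have hza : ¬ z = a := fun he => hnd1 (he ▸ hz)
      have hz1' : ¬ z ∈ act := by simpa using hz1
      simp [hz1', hza]
    have := ih (act ++ [a]) _ _ hnd2 hfresh' h1 inv1
    simpa [List.append_assoc] using this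

-- ScoreInv is invariant under membership-equivalent active lists
theorem scoreinv_congr (items : List (String × List (String × Int)))
    (sc : PySem.Dict String Int) (act act' : List String)
    (h : ∀ y, act.contains y = act'.contains y) (inv : ScoreInv items sc act) :
    ScoreInv items sc act' :=
  fun p hp => (inv p hp).trans (wsum_congr p.2 act act' h)

-- the guarded initial fold (dedup of `active`) establishes the invariants
theorem init_fold (items : List (String × List (String × Int))) (L : List String)
    (hn : (items.map (·.1)).Nodup) :
    ∀ (act : List String) (s : PySem.Set String) (sc : PySem.Dict String Int),
    (∀ y, PySem.Set.contains s y = act.contains y) → ScoreInv items sc act →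
    (∀ y, PySem.Set.contains
        (L.foldl (fun st a => if PySem.Set.contains st.1 a then st
            else cascadeActivate (buildRev items) st a) (s, sc)).1 y
        = (act ++ L).contains y)
      ∧ ScoreInv items
          (L.foldl (fun st a => if PySem.Set.contains st.1 a then st
              else cascadeActivate (buildRev items) st a) (s, sc)).2 (act ++ L) := by
  induction L with
  | nil =>
    intro act s sc h inv
    simp only [List.foldl_nil, List.append_nil]
    exact ⟨h, inv⟩
  | cons a L ih =>
    intro act s sc h inv
    rw [List.foldl_cons]
    by_cases hc : PySem.Set.contains s a = true
    · have hmem : act.contains a = true := by rw [← h a]; exact hc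
      have hcont : ∀ y, (act ++ L).contains y = (act ++ a :: L).contains y := by
        intro y
        by_cases hy : y = a
        · subst hy
          have hmem' : y ∈ act := by simpa using hmem
          simp [hmem']
        · simp [hy]
      simp only [hc, if_true]
      obtain ⟨h', inv'⟩ := ih act s sc h inv
      exact ⟨fun y => (h' y).trans (hcont y), scoreinv_congr items _ _ _ hcont inv'⟩
    · have hxa : act.contains a = false := by rw [← h a]; simpa using hc
      simp only [hc, Bool.false_eq_true, if_false]
      obtain ⟨h1, inv1⟩ := activate_one items a hn s sc act hxa h inv
      have := ih (act ++ [a]) _ _ h1 inv1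
      simpa [List.append_assoc] using this

-- A's round equals `act` followed by B's key scan against the cached scores
theorem step_eq (items : List (String × List (String × Int))) (threshold : Int)
    (act : List String) (s : PySem.Set String) (sc : PySem.Dict String Int)
    (h : ∀ y, PySem.Set.contains s y = act.contains y) (inv : ScoreInv items sc act) :
    cascadeStepA items threshold act
      = act ++ (items.map (·.1)).filter
          (fun k => !PySem.Set.contains s k && decide (threshold ≤ sc.getD k 0)) := by
  unfold cascadeStepA
  have hbody : (fun (na : List String) (p : String × List (String × Int)) =>
      if act.contains p.1 then na
      else
        let cumulative_input :=
          p.2.foldl (fun acc q => acc + (if act.contains q.1 then 1 else 0) * q.2) 0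
        if threshold ≤ cumulative_input then na ++ [p.1] else na)
      = (fun na p =>
          if (!act.contains p.1 && decide (threshold ≤ wsum p.2 act)) then na ++ [p.1] else na) := by
    funext na p
    by_cases h1 : act.contains p.1 = true
    · have h1' : p.1 ∈ act := by simpa using h1
      simp [h1']
    · have h1' : act.contains p.1 = false := by simpa using h1
      simp only [h1', Bool.false_eq_true, if_false, Bool.not_false, Bool.true_and]
      rw [show (p.2.foldl (fun acc q => acc + (if act.contains q.1 then 1 else 0) * q.2) 0)
          = 0 + wsum p.2 act from foldl01_eq_wsum p.2 act 0, zero_add]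
      by_cases h2 : threshold ≤ wsum p.2 act <;> simp [h2]
  rw [hbody, PySem.List.foldl_append_if
    (fun p : String × List (String × Int) =>
      (!act.contains p.1 && decide (threshold ≤ wsum p.2 act))) (·.1) items act,
    List.filter_map]
  have hpred : ∀ p ∈ items,
      (fun p : String × List (String × Int) =>
        !act.contains p.1 && decide (threshold ≤ wsum p.2 act)) p
      = ((fun k => !PySem.Set.contains s k && decide (threshold ≤ sc.getD k 0)) ∘ (·.1)) p := by
    intro p hp
    simp only [Function.comp]
    rw [h p.1, inv p hp]
  rw [List.filter_congr hpred]

-- the two loops agree round for round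
theorem loop_eq (items : List (String × List (String × Int))) (threshold : Int)
    (hn : (items.map (·.1)).Nodup) (fuel : Nat) :
    ∀ (act : List String) (s : PySem.Set String) (sc : PySem.Dict String Int),
    (∀ y, PySem.Set.contains s y = act.contains y) → ScoreInv items sc act →
    cascadeRecA items threshold fuel act
      = cascadeLoopB (items.map (·.1)) (buildRev items) threshold fuel act (s, sc) := by
  induction fuel with
  | zero => intro act s sc _ _; rfl
  | succ fuel ih =>
    intro act s sc h inv
    simp only [cascadeRecA, cascadeLoopB]
    rw [step_eq items threshold act s sc h inv]
    by_cases hne : (items.map (·.1)).filter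
        (fun k => !PySem.Set.contains s k && decide (threshold ≤ sc.getD k 0)) = []
    · rw [hne]
      simp
    · set newly := (items.map (·.1)).filter
        (fun k => !PySem.Set.contains s k && decide (threshold ≤ sc.getD k 0)) with hnewly
      have hlen : act.length < (act ++ newly).length := by
        simp only [List.length_append]
        have := List.length_pos_iff.mpr hne
        omega
      have hempty : newly.isEmpty = false := by simp [hne]
      simp only [hlen, if_pos, hempty, Bool.false_eq_true, if_false]
      have hLnd : newly.Nodup := hn.filter _
      have hfresh : ∀ z ∈ newly, act.contains z = false := by
        intro z hz
        have h2 := (List.mem_filter.mp hz).2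
        have h3 : PySem.Set.contains s z = false := by
          rcases Bool.and_eq_true .. |>.mp h2 with ⟨h4, _⟩
          simpa using h4
        rw [← h z]
        exact h3
      obtain ⟨h', inv'⟩ := activate_fold items newly hn act s sc hLnd hfresh h inv
      exact ih (act ++ newly) _ _ h' inv'

-- ===== VERDICT (by name: the statement is the Claim_ definition above) =====
theorem find_cascade_spec : Claim_equal_find_cascade := by
  intro graph active threshold _
  show find_cascade graph active threshold = find_cascade_alt graph active threshold
  unfold find_cascade find_cascade_alt
  have hn : ((PySem.Dict.ofList graph).items.map (·.1)).Nodup := by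
    have := PySem.Dict.nodup_keys_ofList (ps := graph)
    simpa [PySem.Dict.keys] using this
  obtain ⟨h0, inv0⟩ := init_fold (PySem.Dict.ofList graph).items active hn [] PySem.Set.empty
    PySem.Dict.empty (fun y => rfl)
    (fun p _ => by simp [wsum, PySem.Dict.getD_empty])
  exact loop_eq (PySem.Dict.ofList graph).items threshold hn _ active _ _
    (fun y => by simpa using h0 y) (by simpa using inv0)
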